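-- pv_equiv track=rewrite | github.com/jco-c/adventofcode | 2023/day6/day6_p1.py | get_valid_runs
-- ===== SOURCE A (Python) =====
-- def calc_distance(total_time, charging_time):
--     return (total_time - charging_time) * charging_time
--
-- def get_valid_runs(total_time, record_distance):
--     valid_runs = []
--     for charging_time in range(total_time):
--         distance = calc_distance(total_time, charging_time)
--         if distance > record_distance:
--             valid_runs.append(charging_time)
--         if valid_runs and distance <= record_distance:
--             break
--
--     return valid_runs
-- ===== SOURCE B (Python) =====
-- def get_valid_runs(total_time, record_distance):
--     # Contiguous block of charging times t in [0, total_time) with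
--     # (total_time - t) * t > record_distance, found by binary search
--     # on the increasing half of the concave distance parabola.
--     if total_time <= 0:
--         return []
--     mid = total_time // 2
--     if (total_time - mid) * mid <= record_distance:
--         return []
--     lo, hi = 0, mid
--     while lo < hi:
--         m = (lo + hi) // 2
--         if (total_time - m) * m > record_distance:
--             hi = m
--         else:
--             lo = m + 1
--     first = lo
--     last = total_time - first if first >= 1 else total_time - 1
--     return list(range(first, last + 1))
-- ===== Notes on version B (the rewrite author's own statement) =====
-- stated objective: faster
-- what changed: Replaces the linear scan over range(total_time) with a binary search on the increasing half of the concave distance parabola, emitting the contiguous valid block as one range.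
import Mathlib
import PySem

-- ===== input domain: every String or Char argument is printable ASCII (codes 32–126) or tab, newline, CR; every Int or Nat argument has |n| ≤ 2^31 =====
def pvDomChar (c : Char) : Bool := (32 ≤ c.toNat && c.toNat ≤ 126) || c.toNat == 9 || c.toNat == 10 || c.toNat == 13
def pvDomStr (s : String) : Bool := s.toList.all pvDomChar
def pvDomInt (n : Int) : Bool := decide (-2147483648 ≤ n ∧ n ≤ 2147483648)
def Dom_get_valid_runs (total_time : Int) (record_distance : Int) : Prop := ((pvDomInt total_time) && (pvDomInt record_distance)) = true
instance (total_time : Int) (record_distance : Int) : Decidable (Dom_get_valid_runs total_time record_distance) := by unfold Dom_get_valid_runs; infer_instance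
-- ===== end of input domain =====

-- B replaces A's linear scan with a binary search for the lower edge of the
-- contiguous valid block (objective: faster, asymptotic).

-- ===== PORT A =====
def calc_distance (total_time : Int) (charging_time : Int) : Int :=
  (total_time - charging_time) * charging_time

-- the for-loop of A, with `break` rendered as early return of the accumulator
def gvrLoop (total_time : Int) (record_distance : Int) :
    List Int → List Int → List Int
  | [], valid_runs => valid_runs
  | charging_time :: rest, valid_runs =>
    let distance := calc_distance total_time charging_time
    let valid_runs' :=
      if distance > record_distance then valid_runs ++ [charging_time] else valid_runs
    if valid_runs' ≠ [] ∧ distance ≤ record_distance then valid_runs'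
    else gvrLoop total_time record_distance rest valid_runs'

def get_valid_runs (total_time : Int) (record_distance : Int) : List Int :=
  gvrLoop total_time record_distance (PySem.List.pyRange 0 total_time 1) []

-- ===== PORT B =====
-- the while-loop of B: binary search for the first t with (T-t)*t > R
def bsearchB (total_time : Int) (record_distance : Int) (lo hi : Int) : Int :=
  if h : lo < hi then
    let m := PySem.Int.floordiv (lo + hi) 2
    if (total_time - m) * m > record_distance then
      bsearchB total_time record_distance lo m
    else
      bsearchB total_time record_distance (m + 1) hi
  else lo
termination_by (hi - lo).toNat
decreasing_by
  all_goals
    have h2 : (0:Int) < 2 := by omega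
    have := PySem.Int.floordiv_eq_ediv_of_pos (a := lo + hi) h2
    simp only [this] at *
    omega

def get_valid_runs_alt (total_time : Int) (record_distance : Int) : List Int :=
  if total_time ≤ 0 then []
  else
    let mid := PySem.Int.floordiv total_time 2
    if (total_time - mid) * mid ≤ record_distance then []
    else
      let first := bsearchB total_time record_distance 0 mid
      let last := if first ≥ 1 then total_time - first else total_time - 1
      PySem.List.pyRange first (last + 1) 1

-- ===== PRECONDITION & SPEC =====
def Spec_get_valid_runs (total_time : Int) (record_distance : Int) (out : List Int) : Prop := out = get_valid_runs_alt total_time record_distance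
instance (total_time : Int) (record_distance : Int) (out : List Int) : Decidable (Spec_get_valid_runs total_time record_distance out) := by unfold Spec_get_valid_runs; infer_instance

-- ===== CLAIM (what is proved, stated in full; the proofs are below) =====
def Claim_equal_get_valid_runs : Prop := ∀ (total_time : Int) (record_distance : Int), Dom_get_valid_runs total_time record_distance → Spec_get_valid_runs total_time record_distance (get_valid_runs total_time record_distance)

-- ===== LEMMAS AND PROOFS =====

-- concavity of t ↦ (T-t)*t on integers
theorem gvr_concave (T t u : Int) (h1 : t ≤ u) (h2 : u ≤ T - t) :
    (T - t) * t ≤ (T - u) * u := by nlinarith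

-- the loop skips a prefix on which nothing beats the record (accumulator still empty)
theorem gvrLoop_skip (T R : Int) (l1 l2 : List Int)
    (h : ∀ t ∈ l1, ¬ ((T - t) * t > R)) :
    gvrLoop T R (l1 ++ l2) [] = gvrLoop T R l2 [] := by
  induction l1 with
  | nil => rfl
  | cons a l ih =>
    have ha : ¬ ((T - a) * a > R) := h a (by simp)
    simp only [List.cons_append, gvrLoop, calc_distance, ha, if_false]
    simp only [ne_eq, not_true_eq_false, false_and, if_false]
    exact ih (fun t ht => h t (by simp [ht]))

-- the loop appends every element of a block that beats the record
theorem gvrLoop_take (T R : Int) (l2 : List Int) :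
    ∀ (l3 acc : List Int), (∀ t ∈ l2, (T - t) * t > R) →
    gvrLoop T R (l2 ++ l3) acc = gvrLoop T R l3 (acc ++ l2) := by
  induction l2 with
  | nil => intro l3 acc _; simp
  | cons a l ih =>
    intro l3 acc h
    have ha : (T - a) * a > R := h a (by simp)
    simp only [List.cons_append, gvrLoop, calc_distance, ha, if_true]
    have hnot : ¬ ((acc ++ [a] ≠ []) ∧ (T - a) * a ≤ R) := by
      rintro ⟨-, h2⟩; omega
    rw [if_neg hnot, ih l3 (acc ++ [a]) (fun t ht => h t (by simp [ht]))]
    simp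
  
-- the loop breaks at the first failing element once the accumulator is nonempty
theorem gvrLoop_stop (T R : Int) (l3 acc : List Int) (hacc : acc ≠ [])
    (h : ∀ t ∈ l3, ¬ ((T - t) * t > R)) :
    gvrLoop T R l3 acc = acc := by
  cases l3 with
  | nil => rfl
  | cons a l =>
    have ha : ¬ ((T - a) * a > R) := h a (by simp)
    simp only [gvrLoop, calc_distance, ha, if_false]
    rw [if_pos ⟨hacc, by omega⟩]

-- binary-search invariant: result is the least t in [lo, hi] beating the record
theorem bsearchB_spec (T R : Int) :
    ∀ (n : Nat) (lo hi : Int), (hi - lo).toNat = n → 0 ≤ lo → lo ≤ hi →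
    (T - hi) * hi > R → (lo = 0 ∨ ¬ ((T - (lo - 1)) * (lo - 1) > R)) →
    lo ≤ bsearchB T R lo hi ∧ bsearchB T R lo hi ≤ hi ∧
    (T - bsearchB T R lo hi) * bsearchB T R lo hi > R ∧
    (bsearchB T R lo hi = 0 ∨
      ¬ ((T - (bsearchB T R lo hi - 1)) * (bsearchB T R lo hi - 1) > R)) := by
  intro n
  induction n using Nat.strong_induction_on with
  | _ n ih =>
    intro lo hi hn h0 hle hhi hlo
    rw [bsearchB]
    by_cases hlt : lo < hi
    · simp only [hlt, dif_pos]
      have h2 : (0:Int) < 2 := by omega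
      have hm : PySem.Int.floordiv (lo + hi) 2 = (lo + hi) / 2 :=
        PySem.Int.floordiv_eq_ediv_of_pos h2
      simp only [hm]
      have hmb : lo ≤ (lo + hi) / 2 ∧ (lo + hi) / 2 < hi := by omega
      by_cases hPm : (T - (lo + hi) / 2) * ((lo + hi) / 2) > R
      · rw [if_pos hPm]
        exact (ih (((lo + hi) / 2 - lo).toNat) (by omega) lo ((lo + hi) / 2) rfl h0
          (by omega) hPm hlo).imp (by omega) (fun ⟨a, b⟩ => ⟨by omega, b⟩)
      · rw [if_neg hPm]
        exact (ih ((hi - ((lo + hi) / 2 + 1)).toNat) (by omega) ((lo + hi) / 2 + 1) hi rfl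
          (by omega) (by omega) hhi (Or.inr (by simpa using hPm))).imp (by omega) id
    · simp only [hlt, dif_neg, not_false_eq_true]
      have : lo = hi := by omega
      subst this
      exact ⟨le_refl _, le_refl _, hhi, hlo⟩

theorem get_valid_runs_eq (T R : Int) : get_valid_runs T R = get_valid_runs_alt T R := by
  unfold get_valid_runs get_valid_runs_alt
  by_cases hT : T ≤ 0
  · rw [if_pos hT, PySem.List.pyRange_one_eq_nil hT]; rfl
  · rw [if_neg hT]
    have hmid : PySem.Int.floordiv T 2 = T / 2 :=
      PySem.Int.floordiv_eq_ediv_of_pos (by omega)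
    have hmb : 0 ≤ PySem.Int.floordiv T 2 ∧ PySem.Int.floordiv T 2 ≤ T - PySem.Int.floordiv T 2 ∧
        T - PySem.Int.floordiv T 2 ≤ PySem.Int.floordiv T 2 + 1 := by rw [hmid]; omega
    set mid := PySem.Int.floordiv T 2 with hmiddef
    -- every distance is at most the distance at mid
    have hpeak : ∀ t : Int, 0 ≤ t → t < T → (T - t) * t ≤ (T - mid) * mid := by
      intro t ht0 htT
      by_cases hc : t ≤ mid
      · exact gvr_concave T t mid hc (by omega)
      · have := gvr_concave T (T - t) mid (by omega) (by omega)
        nlinarith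
    by_cases hno : (T - mid) * mid ≤ R
    · rw [if_pos hno]
      have : PySem.List.pyRange 0 T 1 = PySem.List.pyRange 0 T 1 ++ [] := by simp
      rw [this, gvrLoop_skip]
      · rfl
      · intro t ht
        rw [PySem.List.mem_pyRange_one] at ht
        have := hpeak t ht.1 ht.2
        omega
    · rw [if_neg hno]
      obtain ⟨hf0, hfm, hPf, hprev⟩ :=
        bsearchB_spec T R (mid.toNat) 0 mid (by omega) (le_refl 0) (by omega) (by omega)
          (Or.inl rfl)
      set first := bsearchB T R 0 mid with hfdef
      set last := if first ≥ 1 then T - first else T - 1 with hldef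
      have hlb : first ≤ last ∧ last ≤ T - 1 := by
        rw [hldef]; split_ifs with _ <;> omega
      -- anything strictly below `first` does not beat the record
      have hlow : ∀ s : Int, 0 ≤ s → s < first → ¬ ((T - s) * s > R) := by
        intro s hs0 hsf
        have h1 : first ≥ 1 := by omega
        have hprev' : ¬ ((T - (first - 1)) * (first - 1) > R) := by
          rcases hprev with h | h
          · omega
          · exact h
        have := gvr_concave T s (first - 1) (by omega) (by omega)
        omega
      -- the valid block is exactly [first, last]
      have hvalid : ∀ t : Int, first ≤ t → t ≤ last → (T - t) * t > R := by
        intro t h1 h2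
        have hub : t ≤ T - first := by
          rw [hldef] at h2; split_ifs at h2 with _ <;> omega
        have := gvr_concave T first t h1 hub
        omega
      have hhigh : ∀ t : Int, last < t → t < T → ¬ ((T - t) * t > R) := by
        intro t h1 h2
        have hge : first ≥ 1 := by
          by_contra hc
          rw [hldef] at h1
          split_ifs at h1 with hx <;> omega
        have hlt : last = T - first := by rw [hldef]; split_ifs with hx <;> omega
        have := hlow (T - t) (by omega) (by omega)
        intro hP
        apply this
        nlinarith
      -- split the scanned range into the three blocks
      have hsplit : PySem.List.pyRange 0 T 1 =
          PySem.List.pyRange 0 first 1 ++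
          (PySem.List.pyRange first (last + 1) 1 ++ PySem.List.pyRange (last + 1) T 1) := by
        rw [PySem.List.pyRange_one_append 0 first T (by omega) (by omega),
            PySem.List.pyRange_one_append first (last + 1) T (by omega) (by omega)]
      have h1all : ∀ t ∈ PySem.List.pyRange 0 first 1, ¬ ((T - t) * t > R) := by
        intro t ht
        rw [PySem.List.mem_pyRange_one] at ht
        exact hlow t ht.1 ht.2
      have h2all : ∀ t ∈ PySem.List.pyRange first (last + 1) 1, (T - t) * t > R := by
        intro t ht
        rw [PySem.List.mem_pyRange_one] at ht
        exact hvalid t ht.1 (by omega)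
      have h3all : ∀ t ∈ PySem.List.pyRange (last + 1) T 1, ¬ ((T - t) * t > R) := by
        intro t ht
        rw [PySem.List.mem_pyRange_one] at ht
        exact hhigh t (by omega) ht.2
      have hne : ([] : List Int) ++ PySem.List.pyRange first (last + 1) 1 ≠ [] := by
        intro h
        rw [List.nil_append] at h
        have hmem : first ∈ PySem.List.pyRange first (last + 1) 1 := by
          rw [PySem.List.mem_pyRange_one]; omega
        rw [h] at hmem
        simp at hmem
      rw [hsplit, gvrLoop_skip T R _ _ h1all,
          gvrLoop_take T R _ _ _ h2all,
          gvrLoop_stop T R _ _ hne h3all]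
      simp only [List.nil_append]
      rw [hldef]

-- ===== VERDICT (by name: the statement is the Claim_ definition above) =====
theorem get_valid_runs_spec : Claim_equal_get_valid_runs := by
  intro T R _
  unfold Spec_get_valid_runs
  exact get_valid_runs_eq T R
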